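-- pv_equiv track=rewrite | github.com/Jeraldheo/Programming | Python/Projects/exercise.py | sortRoman
-- ===== SOURCE A (Python) =====
-- def sortRoman(names):
--     data  = {}
--     result = []
--     n = len(names)
--     for i in range(n):
--         name_roman = names[i].split()
--         name = name_roman[0]
--         if name in data:
--             data[name].append(names[i])
--         else:
--             data[name] = [names[i]]
--
--     for name in sorted(data.keys()):
--         result.extend(sorted(data[name]))
--
--     return result
-- ===== SOURCE B (Python) =====
-- def sortRoman(names):
--     # One composite-key sort: group order = first word, within-group order = full string.
--     return sorted(names, key=lambda s: (s.split()[0], s))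
-- ===== Notes on version B (the rewrite author's own statement) =====
-- stated objective: simpler
-- what changed: Replaced the dict-grouping pass plus a sort of the keys plus a sort per group with a single sorted() call on a composite key (first word, full string).
import Mathlib
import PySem

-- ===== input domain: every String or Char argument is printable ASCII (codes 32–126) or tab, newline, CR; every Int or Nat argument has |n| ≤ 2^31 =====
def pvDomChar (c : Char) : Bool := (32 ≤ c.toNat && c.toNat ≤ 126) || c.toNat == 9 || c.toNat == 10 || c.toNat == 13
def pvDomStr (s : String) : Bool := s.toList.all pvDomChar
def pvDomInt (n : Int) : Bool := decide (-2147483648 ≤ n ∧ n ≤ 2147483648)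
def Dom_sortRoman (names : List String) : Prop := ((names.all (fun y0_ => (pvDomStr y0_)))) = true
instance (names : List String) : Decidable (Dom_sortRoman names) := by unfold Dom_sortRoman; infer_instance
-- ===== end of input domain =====

-- B replaces A's dict grouping + key sort + per-group sorts by ONE sort on the composite
-- key (first word, full string); same return value, simpler code.

-- ===== PORT A =====
-- s.split()[0], the grouping-key expression both Pythons share
def pvFirstWord (s : String) : String := (PySem.List.pyGet? (PySem.Str.split₀ s) 0).getD ""

-- the body of A's first loop, for the element names[i]
def sortRomanStep (d : PySem.Dict String (List String)) (x : String) : PySem.Dict String (List String) :=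
  let name := pvFirstWord x
  if d.contains name then d.modify name [] (fun l => l ++ [x]) else d.insert name [x]

-- A's first loop: data = the dict grouping names[i] under names[i].split()[0]
def sortRomanData (names : List String) : PySem.Dict String (List String) :=
  (PySem.List.pyRange 0 (PySem.List.len names)).foldl
      (fun d i => sortRomanStep d (PySem.List.pyGetD names i "")) PySem.Dict.empty

def sortRoman (names : List String) : List String :=
  (PySem.List.sorted (sortRomanData names).keys (fun k => k)).foldl
      (fun result name => result ++ PySem.List.sorted ((sortRomanData names).getD name []) (fun x => x)) []

-- ===== PORT B =====
def sortRoman_alt (names : List String) : List String :=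
  PySem.List.sorted2 names (fun s => pvFirstWord s) (fun s => s)

-- ===== PRECONDITION & SPEC =====
-- Pre_ excludes lists containing an empty or whitespace-only string: there s.split()[0]
-- raises IndexError in A (and likewise in B).
def Pre_sortRoman (names : List String) : Prop := ∀ s ∈ names, PySem.Str.split₀ s ≠ []
instance (names : List String) : Decidable (Pre_sortRoman names) := by unfold Pre_sortRoman; infer_instance
def pvWitness_sortRoman : List String := ["alpha two", "beta", "alpha one", "beta"]
def Spec_sortRoman (names : List String) (out : List String) : Prop := out = sortRoman_alt names
instance (names : List String) (out : List String) : Decidable (Spec_sortRoman names out) := by unfold Spec_sortRoman; infer_instance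

-- ===== CLAIM (what is proved, stated in full; the proofs are below) =====
def Claim_equal_sortRoman : Prop := ∀ (names : List String), Dom_sortRoman names → Pre_sortRoman names → Spec_sortRoman names (sortRoman names)

-- ===== LEMMAS AND PROOFS =====

-- the composite key both outputs turn out to be sorted by
def pvKey (s : String) : Lex (String × String) := toLex (pvFirstWord s, s)

lemma pvKey_injective : Function.Injective pvKey := by
  intro a b h
  exact congrArg (fun x => (ofLex x).2) h

lemma pvKey_le_of_fw_lt {a b : String} (h : pvFirstWord a < pvFirstWord b) : pvKey a ≤ pvKey b := by
  rw [pvKey, pvKey, Prod.Lex.le_iff]; left; simpa using h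

lemma pvKey_le_of_fw_eq {a b : String} (h : pvFirstWord a = pvFirstWord b) (h2 : a ≤ b) :
    pvKey a ≤ pvKey b := by
  rw [pvKey, pvKey, Prod.Lex.le_iff]
  right
  refine ⟨by simpa using h, ?_⟩
  simpa using h2

-- B's tuple-key sort is the one-key sort by the lexicographic pair
lemma sorted2_eq_sorted_lex (xs : List String) (k1 k2 : String → String) :
    PySem.List.sorted2 xs k1 k2 = PySem.List.sorted xs (fun x => toLex (k1 x, k2 x)) := by
  simp only [PySem.List.sorted2, PySem.List.sorted]
  have h : (fun a b => decide (k1 a < k1 b) || (!decide (k1 b < k1 a) && decide (k2 a < k2 b)))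
      = (fun (a b : String) => decide (toLex (k1 a, k2 a) < toLex (k1 b, k2 b))) := by
    funext a b
    rcases lt_trichotomy (k1 a) (k1 b) with h|h|h <;>
      simp [Prod.Lex.lt_iff, h, ne_of_lt, lt_asymm]
  rw [h]
  rfl

-- A's index loop is the grouping fold over the elements
lemma dict_eq (names : List String) :
    sortRomanData names
    = names.foldl (fun d x => d.modify (pvFirstWord x) [] (fun l => l ++ [x])) PySem.Dict.empty := by
  unfold sortRomanData
  rw [PySem.List.foldl_pyRange_pyGetD names "" sortRomanStep _ le_rfl, Int.toNat_zero, List.drop_zero]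
  have hs : sortRomanStep = fun d x => d.modify (pvFirstWord x) [] (fun l => l ++ [x]) := by
    funext d x
    unfold sortRomanStep
    by_cases h : (d.contains (pvFirstWord x)) = true
    · simp [h, PySem.Dict.modify]
    · have hc : d.contains (pvFirstWord x) = false := by simpa using h
      simp [PySem.Dict.modify, PySem.Dict.getD_of_not_contains, hc]
  rw [hs]

lemma dict_getD (names : List String) (k : String) :
    (names.foldl (fun d x => d.modify (pvFirstWord x) [] (fun l => l ++ [x])) PySem.Dict.empty).getD k []
    = names.filter (fun x => pvFirstWord x == k) := by
  have h : names.foldl (fun d x => d.modify (pvFirstWord x) [] (fun l => l ++ [x])) PySem.Dict.empty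
      = (names.map (fun x => (pvFirstWord x, x))).foldl
          (fun d p => d.modify p.1 [] (fun l => l ++ [p.2])) PySem.Dict.empty := by
    rw [List.foldl_map]
  rw [h, PySem.Dict.getD_foldl_modify_append]
  simp [List.filter_map, Function.comp_def]

lemma dict_keys (names : List String) :
    (names.foldl (fun d x => d.modify (pvFirstWord x) [] (fun l => l ++ [x])) PySem.Dict.empty).keys
    = PySem.Set.ofList (names.map pvFirstWord) := by
  rw [PySem.Dict.keys_foldl_modify_key names pvFirstWord [] (fun _ x => fun l => l ++ [x])]
  simp [PySem.Set.update, PySem.Set.ofList_eq_foldl, PySem.Dict.keys_empty]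

lemma dict_keys_nodup (names : List String) :
    (names.foldl (fun d x => d.modify (pvFirstWord x) [] (fun l => l ++ [x])) PySem.Dict.empty).keys.Nodup :=
  PySem.Dict.nodup_keys_foldl_modify_key names pvFirstWord [] _ _ (by simp [PySem.Dict.keys_empty])

lemma flatMap_filter_perm (ks : List String) : ∀ (names : List String), ks.Nodup →
    (∀ x ∈ names, pvFirstWord x ∈ ks) →
    (ks.flatMap (fun k => names.filter (fun x => pvFirstWord x == k))).Perm names := by
  induction ks with
  | nil =>
    intro names _ hcov
    have : names = [] := by
      cases names with
      | nil => rfl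
      | cons a t => exact absurd (hcov a (List.mem_cons_self)) (by simp)
    simp [this]
  | cons k ks ih =>
    intro names hnd hcov
    rw [List.flatMap_cons]
    set rest := names.filter (fun x => !(pvFirstWord x == k)) with hrest
    have hsame : ∀ k' ∈ ks, names.filter (fun x => pvFirstWord x == k')
        = rest.filter (fun x => pvFirstWord x == k') := by
      intro k' hk'
      rw [hrest, List.filter_filter]
      apply List.filter_congr
      intro x hx
      have hne : k' ≠ k := by rintro rfl; exact (List.nodup_cons.mp hnd).1 hk'
      by_cases h : pvFirstWord x = k'
      · simp [h, hne]
      · simp [h]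
    have hflat : ks.flatMap (fun k' => names.filter (fun x => pvFirstWord x == k'))
        = ks.flatMap (fun k' => rest.filter (fun x => pvFirstWord x == k')) := by
      apply List.flatMap_congr
      intro k' hk'
      exact hsame k' hk'
    have hcov' : ∀ x ∈ rest, pvFirstWord x ∈ ks := by
      intro x hx
      rw [hrest] at hx
      obtain ⟨hx1, hx2⟩ := List.mem_filter.mp hx
      rcases List.mem_cons.mp (hcov x hx1) with h | h
      · simp_all
      · simpa using h
    have hperm := ih rest (List.nodup_cons.mp hnd).2 hcov'
    rw [hflat]
    exact (hperm.append_left _).trans (by rw [hrest]; exact List.filter_append_perm _ names)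

lemma flatMap_pairwise (ks names : List String) (hlt : ks.Pairwise (· < ·)) :
    (ks.flatMap (fun k =>
        PySem.List.sorted (names.filter (fun x => pvFirstWord x == k)) (fun x => x))).Pairwise
      (fun a b => pvKey a ≤ pvKey b) := by
  induction ks with
  | nil => simp
  | cons k ks ih =>
    rw [List.flatMap_cons, List.pairwise_append]
    obtain ⟨hk, hks⟩ := List.pairwise_cons.mp hlt
    have hmem : ∀ k' (x : String),
        x ∈ PySem.List.sorted (names.filter (fun x => pvFirstWord x == k')) (fun x => x) →
        pvFirstWord x = k' := by
      intro k' x hx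
      have := (PySem.List.mem_sorted _ _ _ x).mp hx
      simpa using (List.mem_filter.mp this).2
    refine ⟨?_, ih hks, ?_⟩
    · have hp := PySem.List.sorted_pairwise (names.filter (fun x => pvFirstWord x == k)) (fun x => x)
      refine hp.imp_of_mem ?_
      intro a b ha hb hab
      exact pvKey_le_of_fw_eq ((hmem k a ha).trans (hmem k b hb).symm) hab
    · intro a ha b hb
      obtain ⟨k', hk', hbk'⟩ := List.mem_flatMap.mp hb
      have h1 : pvFirstWord a = k := hmem k a ha
      have h2 : pvFirstWord b = k' := hmem k' b hbk'
      exact pvKey_le_of_fw_lt (by rw [h1, h2]; exact hk k' hk')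

-- A's result, in closed form: sorted distinct keys, each block the sorted filter
lemma sortRoman_eq_flatMap (names : List String) :
    sortRoman names
    = (PySem.List.sorted (PySem.Set.ofList (names.map pvFirstWord)) (fun k => k)).flatMap
        (fun k => PySem.List.sorted (names.filter (fun x => pvFirstWord x == k)) (fun x => x)) := by
  unfold sortRoman
  rw [dict_eq, dict_keys, PySem.List.foldl_append_eq_flatMap, List.nil_append]
  apply List.flatMap_congr
  intro k _
  rw [dict_getD]

lemma ks_nodup (names : List String) :
    (PySem.List.sorted (PySem.Set.ofList (names.map pvFirstWord)) (fun k => k)).Nodup := by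
  refine (PySem.List.sorted_perm _ _ _).symm.nodup ?_
  rw [← dict_keys names]
  exact dict_keys_nodup names

lemma ks_pairwise_lt (names : List String) :
    (PySem.List.sorted (PySem.Set.ofList (names.map pvFirstWord)) (fun k => k)).Pairwise (· < ·) := by
  have hle := PySem.List.sorted_pairwise (PySem.Set.ofList (names.map pvFirstWord)) (fun k => k)
  have hnd := ks_nodup names
  exact (hle.and hnd).imp (fun h => lt_of_le_of_ne h.1 h.2)

lemma sortRoman_perm (names : List String) : (sortRoman names).Perm names := by
  rw [sortRoman_eq_flatMap]
  have h1 : ((PySem.List.sorted (PySem.Set.ofList (names.map pvFirstWord)) (fun k => k)).flatMap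
      (fun k => PySem.List.sorted (names.filter (fun x => pvFirstWord x == k)) (fun x => x))).Perm
      ((PySem.List.sorted (PySem.Set.ofList (names.map pvFirstWord)) (fun k => k)).flatMap
      (fun k => names.filter (fun x => pvFirstWord x == k))) := by
    apply List.Perm.flatMap_left
    intro k _
    exact PySem.List.sorted_perm _ _ _
  refine h1.trans ?_
  apply flatMap_filter_perm _ names (ks_nodup names)
  intro x hx
  rw [PySem.List.mem_sorted]
  exact (PySem.Set.mem_ofList _ _).mpr (List.mem_map_of_mem hx)

lemma sortRoman_pairwise (names : List String) :
    (sortRoman names).Pairwise (fun a b => pvKey a ≤ pvKey b) := by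
  rw [sortRoman_eq_flatMap]
  exact flatMap_pairwise _ names (ks_pairwise_lt names)

-- ===== VERDICT (by name: the statement is the Claim_ definition above) =====
theorem sortRoman_spec : Claim_equal_sortRoman := by
  intro names _ _
  unfold Spec_sortRoman
  have hb : sortRoman_alt names = PySem.List.sorted names pvKey := by
    unfold sortRoman_alt pvKey
    exact sorted2_eq_sorted_lex names _ _
  refine Eq.symm ?_
  rw [hb]
  refine PySem.List.eq_of_perm_of_pairwise_le_of_injective pvKey pvKey_injective
    ?_ ?_ (sortRoman_pairwise names)
  · exact ((PySem.List.sorted_perm names pvKey false).trans (sortRoman_perm names).symm)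
  · exact PySem.List.sorted_pairwise names pvKey
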